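-- pv_equiv track=rewrite | github.com/hyl2000/S2SA | Utils.py | remove_duplicate_once
-- ===== SOURCE A (Python) =====
-- def remove_duplicate_once(sents, n=3):
--     changed = False
--     for b in range(len(sents)):
--         sent = sents[b]
--         if len(sent) <= n:
--             continue
--
--         for i in range(len(sent) - n):
--             index = len(sent) - i - n
--             if all(elem in sent[:index] for elem in sent[index:]):
--                 sents[b] = sent[:index]
--                 changed = True
--                 break
--     return changed
-- ===== SOURCE B (Python) =====
-- def remove_duplicate_once(sents, n=3):
--     # Same return value and same in-place truncation as A, by a different algorithm:
--     # scan the cut index downward once, maintaining prefix element counts and the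
--     # set of suffix elements, tracking how many suffix elements are missing from
--     # the prefix; cut at the first (largest) index with nothing missing.
--     changed = False
--     for b in range(len(sents)):
--         sent = sents[b]
--         L = len(sent)
--         if L <= n:
--             continue
--         index = L - n
--         cnt = {}
--         for x in sent[:index]:
--             cnt[x] = cnt.get(x, 0) + 1
--         suffix = set(sent[index:])
--         missing = sum(1 for y in suffix if cnt.get(y, 0) == 0)
--         while index >= 1:
--             if missing == 0:
--                 sents[b] = sent[:index]
--                 changed = True
--                 break
--             index -= 1
--             x = sent[index]
--             cnt[x] = cnt.get(x, 0) - 1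
--             suffix.add(x)
--             if cnt[x] == 0:
--                 missing += 1
--     return changed
-- ===== Notes on version B (the rewrite author's own statement) =====
-- stated objective: alternative
-- what changed: Replaces the per-cut-index membership re-scan (all(elem in sent[:index] ...) recomputed from scratch for every candidate index) by a single downward scan that incrementally maintains prefix element counts, the set of suffix elements, and the number of suffix elements missing from the prefix.
import Mathlib
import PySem

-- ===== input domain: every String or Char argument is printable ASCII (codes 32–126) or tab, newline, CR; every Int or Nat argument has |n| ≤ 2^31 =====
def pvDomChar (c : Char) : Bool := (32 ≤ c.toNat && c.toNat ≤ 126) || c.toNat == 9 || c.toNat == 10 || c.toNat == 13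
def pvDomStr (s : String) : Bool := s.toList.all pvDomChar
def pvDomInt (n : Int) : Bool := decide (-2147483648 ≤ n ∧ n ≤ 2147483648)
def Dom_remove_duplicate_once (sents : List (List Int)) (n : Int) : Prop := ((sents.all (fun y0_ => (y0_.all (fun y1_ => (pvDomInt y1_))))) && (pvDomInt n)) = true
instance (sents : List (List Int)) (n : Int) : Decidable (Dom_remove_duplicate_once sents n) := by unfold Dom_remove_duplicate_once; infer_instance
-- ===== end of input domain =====

-- B replaces A's per-cut-index membership re-scan by a single downward scan maintaining prefix
-- element counts, the suffix element set and a missing-from-prefix count (objective: alternative).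
-- Both Pythons also truncate sents[b] in place at the same index; the theorems below are about
-- the return value only.


-- ===== PORT A =====
-- inner 'for i in range(len(sent) - n): … break' ported as counter recursion (i, stop)
def pvA_inner (sent : List Int) (n : Int) (i stop : Int) : Bool :=
  if h : i < stop then
    let index : Int := (sent.length : Int) - i - n
    if (PySem.List.slice sent (some index) none).all
        (fun elem => (PySem.List.slice sent none (some index)).contains elem) then
      true
    else pvA_inner sent n (i + 1) stop
  else false
termination_by (stop - i).toNat
decreasing_by omega

def remove_duplicate_once (sents : List (List Int)) (n : Int) : Bool :=
  -- 'for b in range(len(sents))': sents[b] is read before any mutation of that entry,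
  -- so a fold over the given list is faithful for the returned Bool
  sents.foldl
    (fun changed sent =>
      if (sent.length : Int) ≤ n then changed
      else if pvA_inner sent n 0 ((sent.length : Int) - n) then true else changed)
    false

-- ===== PORT B =====
-- the 'while index >= 1' loop of Source B
def pvB_loop (sent : List Int) (cnt : PySem.Dict Int Int) (suffix : PySem.Set Int)
    (missing : Int) (index : Int) : Bool :=
  if h : index ≥ 1 then
    if missing == 0 then true
    else
      let index' := index - 1
      match PySem.List.pyGet? sent index' with
      | none => false
      | some x =>
        let cnt' := cnt.insert x (cnt.getD x 0 - 1)
        let suffix' := PySem.Set.add suffix x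
        let missing' := if cnt'.getD x 0 == 0 then missing + 1 else missing
        pvB_loop sent cnt' suffix' missing' index'
  else false
termination_by index.toNat
decreasing_by omega

-- countP after a single-point predicate change, on a Nodup list

def remove_duplicate_once_alt (sents : List (List Int)) (n : Int) : Bool :=
  sents.foldl
    (fun changed sent =>
      let L : Int := sent.length
      if L ≤ n then changed
      else
        let index : Int := L - n
        let cnt := (PySem.List.slice sent none (some index)).foldl
          (fun d x => d.insert x (d.getD x 0 + 1)) PySem.Dict.empty
        let suffix := PySem.Set.ofList (PySem.List.slice sent (some index) none)
        let missing : Int := suffix.foldl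
          (fun acc y => if cnt.getD y 0 == 0 then acc + 1 else acc) 0
        if pvB_loop sent cnt suffix missing index then true else changed)
    false

-- ===== PRECONDITION & SPEC =====
def Spec_remove_duplicate_once (sents : List (List Int)) (n : Int) (out : Bool) : Prop := out = remove_duplicate_once_alt sents n
instance (sents : List (List Int)) (n : Int) (out : Bool) : Decidable (Spec_remove_duplicate_once sents n out) := by unfold Spec_remove_duplicate_once; infer_instance

-- ===== CLAIM (what is proved, stated in full; the proofs are below) =====
def Claim_equal_remove_duplicate_once : Prop := ∀ (sents : List (List Int)) (n : Int), Dom_remove_duplicate_once sents n → Spec_remove_duplicate_once sents n (remove_duplicate_once sents n)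

-- ===== LEMMAS AND PROOFS =====

-- the condition "every element of sent[k:] occurs in sent[:k]" at a Nat cut point k
def pvCond (sent : List Int) (k : Nat) : Bool :=
  (sent.drop k).all (fun e => (sent.take k).contains e)

-- "some cut point in k, k-1, …, 1 satisfies pvCond" (both loops scan cut points in this order)
def pvAnyDesc (sent : List Int) : Nat → Bool
  | 0 => false
  | k + 1 => pvCond sent (k + 1) || pvAnyDesc sent k

theorem pvA_inner_eq_anyDesc (sent : List Int) (n : Int) (j : Nat)
    (hj : (j : Int) ≤ (sent.length : Int) - n) :
    pvA_inner sent n ((sent.length : Int) - n - j) ((sent.length : Int) - n)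
      = pvAnyDesc sent j := by
  induction j with
  | zero => rw [pvA_inner]; simp [pvAnyDesc]
  | succ j ih =>
    rw [pvA_inner]
    rw [dif_pos (by omega : (sent.length : Int) - n - (j+1 : Nat) < (sent.length : Int) - n)]
    have hidx : (sent.length : Int) - ((sent.length : Int) - n - ((j+1 : Nat) : Int)) - n
        = ((j+1 : Nat) : Int) := by push_cast; ring
    simp only [hidx, PySem.List.slice_from_natCast, PySem.List.slice_to_natCast]
    have hstep : (sent.length : Int) - n - ((j+1 : Nat) : Int) + 1
        = (sent.length : Int) - n - (j : Nat) := by push_cast; ring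
    rw [hstep, ih (by push_cast at hj ⊢; omega)]
    show (if pvCond sent (j+1) then true else pvAnyDesc sent j) = pvAnyDesc sent (j+1)
    by_cases h : pvCond sent (j+1) <;> simp [pvAnyDesc, h]

-- countP after a single-point predicate change, on a Nodup list
theorem pv_countP_update (l : List Int) (hnd : l.Nodup) (p p' : Int → Bool) (x : Int)
    (h : ∀ y ∈ l, y ≠ x → p' y = p y) (hpx : p x = false) :
    (l.countP p' : Int) = l.countP p + (if x ∈ l ∧ p' x = true then 1 else 0) := by
  induction l with
  | nil => simp
  | cons a t iht =>
    have hnd' := hnd.of_cons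
    have hat : a ∉ t := (List.nodup_cons.mp hnd).1
    by_cases hax : a = x
    · subst hax
      have ht : ∀ y ∈ t, p' y = p y := fun y hy => h y (List.mem_cons_of_mem _ hy) (fun e => hat (e ▸ hy))
      have hteq : t.countP p' = t.countP p := List.countP_congr (fun y hy => by rw [ht y hy])
      simp only [List.countP_cons, hpx, List.mem_cons, hteq]
      by_cases hp' : p' a <;> simp [hp', hat] <;> omega
    · have hpa : p' a = p a := h a List.mem_cons_self hax
      have := iht hnd' (fun y hy hyx => h y (List.mem_cons_of_mem _ hy) hyx)
      simp only [List.countP_cons, hpa, List.mem_cons]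
      by_cases hp : p a <;> by_cases hx : x ∈ t <;>
        simp_all [hax, Ne.symm hax] <;> omega

theorem pvB_loop_eq_anyDesc (sent : List Int) (k : Nat) (hk : k ≤ sent.length)
    (cnt : PySem.Dict Int Int) (suffix : PySem.Set Int) (missing : Int)
    (hnd : (suffix : List Int).Nodup)
    (hcnt : ∀ y, cnt.getD y 0 = ((sent.take k).count y : Int))
    (hmem : ∀ y, y ∈ suffix ↔ y ∈ sent.drop k)
    (hmiss : missing = ((suffix : List Int).countP (fun y => cnt.getD y 0 == 0) : Int)) :
    pvB_loop sent cnt suffix missing (k : Int) = pvAnyDesc sent k := by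
  induction k generalizing cnt suffix missing with
  | zero => rw [pvB_loop]; simp [pvAnyDesc]
  | succ k ih =>
    have hk1 : k < sent.length := by omega
    -- the test (missing == 0) is exactly pvCond sent (k+1)
    have hcond : (missing == 0) = pvCond sent (k + 1) := by
      rw [hmiss, pvCond]
      rcases Bool.eq_false_or_eq_true ((sent.drop (k+1)).all fun e => (sent.take (k+1)).contains e) with hc | hc
      · rw [hc]
        simp only [List.all_eq_true, List.contains_iff_mem] at hc
        have hz : (suffix : List Int).countP (fun y => cnt.getD y 0 == 0) = 0 := by
          apply List.countP_eq_zero.mpr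
          intro y hy
          have hyd := (hmem y).mp hy
          have : y ∈ sent.take (k+1) := hc y hyd
          simp [hcnt y, List.count_eq_zero, this]
        simp [hz]
      · rw [hc]
        obtain ⟨e, he, hem⟩ := List.all_eq_false.mp hc
        rw [List.contains_iff_mem] at hem
        have hem' : e ∉ sent.take (k+1) := by simpa using hem
        have hpe : (fun y => cnt.getD y 0 == 0) e = true := by
          simp [hcnt e, List.count_eq_zero.mpr hem']
        have hpos : 0 < (suffix : List Int).countP (fun y => cnt.getD y 0 == 0) :=
          List.countP_pos_iff.mpr ⟨e, (hmem e).mpr he, hpe⟩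
        rw [Bool.eq_false_iff]
        simp only [ne_eq, beq_iff_eq]
        omega
    rw [pvB_loop, dif_pos (by omega : ((k+1 : Nat) : Int) ≥ 1)]
    rcases Bool.eq_false_or_eq_true (pvCond sent (k+1)) with hc | hc
    case _ =>  -- pvCond true: both sides true
      rw [hcond, hc]
      simp [pvAnyDesc, hc]
    case _ =>  -- pvCond false: missing ≠ 0, recurse
      rw [hcond, hc]
      simp only [Bool.false_eq_true, if_false]
      have hidx : ((k+1 : Nat) : Int) - 1 = ((k : Nat) : Int) := by push_cast; ring
      rw [hidx, PySem.List.pyGet?_natCast, List.getElem?_eq_getElem hk1]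
      set x := sent[k] with hxdef
      have htake : sent.take (k+1) = sent.take k ++ [x] := by
        rw [List.take_succ, List.getElem?_eq_getElem hk1]; rfl
      have hdrop : sent.drop k = x :: sent.drop (k+1) := List.drop_eq_getElem_cons hk1
      have hcx : cnt.getD x 0 = ((sent.take (k+1)).count x : Int) := hcnt x
      have hxmem : x ∈ sent.take (k+1) := by rw [htake]; simp
      have hcntpos : 0 < (sent.take (k+1)).count x := List.count_pos_iff.mpr hxmem
      -- new invariants
      have hcnt' : ∀ y, (cnt.insert x (cnt.getD x 0 - 1)).getD y 0 = ((sent.take k).count y : Int) := by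
        intro y
        rw [PySem.Dict.getD_insert]
        by_cases hyx : y = x
        · subst hyx
          rw [if_pos rfl, hcx, htake]
          simp [List.count_append]
        · rw [if_neg hyx, hcnt y, htake]
          rw [List.count_append]
          have hxy : x ≠ y := fun h => hyx h.symm
          simp [List.count_singleton, hxy]
      have hmem' : ∀ y, y ∈ PySem.Set.add suffix x ↔ y ∈ sent.drop k := by
        intro y
        rw [PySem.Set.mem_add, hmem y, hdrop, List.mem_cons]
        tauto
      have hpx : (fun y => cnt.getD y 0 == 0) x = false := by
        simp [hcx]; omega
      have hupd := pv_countP_update (suffix : List Int) hnd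
        (fun y => cnt.getD y 0 == 0)
        (fun y => (cnt.insert x (cnt.getD x 0 - 1)).getD y 0 == 0) x
        (fun y _ hyx => by simp [PySem.Dict.getD_insert, hyx]) hpx
      have hmiss' :
          (if (cnt.insert x (cnt.getD x 0 - 1)).getD x 0 == 0 then missing + 1 else missing)
            = (((PySem.Set.add suffix x : List Int)).countP
                (fun y => (cnt.insert x (cnt.getD x 0 - 1)).getD y 0 == 0) : Int) := by
        have hgx : (cnt.insert x (cnt.getD x 0 - 1)).getD x 0 = cnt.getD x 0 - 1 :=
          PySem.Dict.getD_insert_self cnt x _ 0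
        by_cases hxs : x ∈ (suffix : List Int)
        · have hadd : PySem.Set.add suffix x = suffix := by
            simp [PySem.Set.add, hxs]
          rw [hadd, hupd, hmiss, hgx]
          by_cases hq : cnt.getD x 0 - 1 = 0 <;> simp [hgx, hq, hxs] <;> omega
        · have hadd : PySem.Set.add suffix x = (suffix : List Int) ++ [x] := by
            simp [PySem.Set.add, hxs]
          rw [hadd, hmiss, hgx]
          push_cast [List.countP_append, List.countP_singleton]
          rw [hupd]
          by_cases hq : cnt.getD x 0 - 1 = 0 <;> simp [hgx, hq, hxs] <;> omega
      dsimp only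
      rw [hmiss']
      have hnd' : (PySem.Set.add suffix x : List Int).Nodup := PySem.Set.nodup_add _ _ hnd
      have := ih (by omega) (cnt.insert x (cnt.getD x 0 - 1)) (PySem.Set.add suffix x) _
        hnd' hcnt' hmem' rfl
      exact this.trans (by simp [pvAnyDesc, hc])

theorem pv_sentence_eq (sent : List Int) (n : Int) (hln : n < (sent.length : Int)) :
    pvA_inner sent n 0 ((sent.length : Int) - n)
      = pvB_loop sent
          ((PySem.List.slice sent none (some ((sent.length : Int) - n))).foldl
            (fun d x => d.insert x (d.getD x 0 + 1)) PySem.Dict.empty)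
          (PySem.Set.ofList (PySem.List.slice sent (some ((sent.length : Int) - n)) none))
          ((PySem.Set.ofList (PySem.List.slice sent (some ((sent.length : Int) - n)) none)).foldl
            (fun acc y =>
              if (((PySem.List.slice sent none (some ((sent.length : Int) - n))).foldl
                    (fun d x => d.insert x (d.getD x 0 + 1)) PySem.Dict.empty :
                      PySem.Dict Int Int)).getD y 0 == 0
              then acc + 1 else acc) 0)
          ((sent.length : Int) - n) := by
  have hL : ((sent.length : Int) - n) = (((sent.length : Int) - n).toNat : Int) := by omega
  set k0 : Nat := ((sent.length : Int) - n).toNat with hk0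
  rw [hL]
  rw [PySem.List.slice_to_natCast, PySem.List.slice_from_natCast]
  set cnt0 : PySem.Dict Int Int :=
    (sent.take k0).foldl (fun d x => d.insert x (d.getD x 0 + 1)) PySem.Dict.empty with hcnt0
  have hcnt : ∀ y, cnt0.getD y 0 = (((sent.take k0).count y : Nat) : Int) := by
    intro y
    rw [hcnt0, PySem.Dict.getD_foldl_insert_add_one]
    simp
  -- A side
  have hA := pvA_inner_eq_anyDesc sent n k0 (by omega)
  have h0 : (sent.length : Int) - n - (k0 : Int) = 0 := by omega
  rw [h0, hL] at hA
  rw [hA]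
  -- B side: initial state satisfies the invariants at k0
  rcases le_or_gt k0 sent.length with hk | hk
  · -- n ≥ 0 enough: k0 ≤ length
    rw [PySem.List.foldl_if_add_one (fun y => cnt0.getD y 0 == 0)
          (PySem.Set.ofList (sent.drop k0)) 0]
    rw [pvB_loop_eq_anyDesc sent k0 hk cnt0 (PySem.Set.ofList (sent.drop k0)) _
          (PySem.Set.nodup_ofList _) hcnt
          (fun y => PySem.Set.mem_ofList _ y) (by omega)]
  · -- k0 > length: n < 0, both sides are trivially true
    have hdrop : sent.drop k0 = [] := List.drop_eq_nil_of_le (by omega)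
    have htrue : pvCond sent k0 = true := by
      rw [pvCond, hdrop]; rfl
    obtain ⟨k1, hk1⟩ : ∃ k1, k0 = k1 + 1 := ⟨k0 - 1, by omega⟩
    rw [hk1]
    rw [pvB_loop, dif_pos (by push_cast; omega)]
    have hsuf : PySem.Set.ofList (sent.drop (k1+1)) = ([] : List Int) := by
      rw [hk1] at hdrop; rw [hdrop]; rfl
    rw [hsuf]
    simp only [List.foldl_nil]
    have hc1 : pvCond sent (k1 + 1) = true := by rw [← hk1]; exact htrue
    have hany : pvAnyDesc sent (k1 + 1) = true := by simp [pvAnyDesc, hc1]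
    simp [hany]

-- ===== VERDICT (by name: the statement is the Claim_ definition above) =====
theorem remove_duplicate_once_spec : Claim_equal_remove_duplicate_once := by
  intro sents n _
  unfold Spec_remove_duplicate_once remove_duplicate_once remove_duplicate_once_alt
  apply PySem.List.foldl_congr_mem
  intro changed sent _
  by_cases h : (sent.length : Int) ≤ n
  · simp only [h, if_true]
  · simp only [h, if_false]
    rw [pv_sentence_eq sent n (by omega)]
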